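-- pv_equiv track=rewrite | github.com/Rcechea/rota-generator | core/weights.py | build_weighted_cost_matrix
-- ===== SOURCE A (Python) =====
-- LARGE_PENALTY = 10_000_000  # Forbidden or impossible
--
-- RECENCY_WEIGHTS = [
--     10_000,   # last month
--     8_000,    # 2 months ago
--     6_000,    # 3 months ago
--     4_000,    # 4 months ago
--     2_000,    # 5 months ago
--     1_000,    # 6+ months ago
-- ]
--
-- def build_weighted_cost_matrix(allowed_matrix, people, areas, history):
--     """
--     Construct a full weighted cost matrix:
--         cost[area][person]
--
--     Recency-based penalties discourage repeating areas too soon.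
--     Forbidden/sickness entries = LARGE_PENALTY.
--     """
--     num_areas = len(allowed_matrix)
--     num_people = len(allowed_matrix[0])
--     cost = [[0 for _ in range(num_people)] for _ in range(num_areas)]
--
--     # Build person/area indices
--     person_index = {p: i for i, p in enumerate(people)}
--     area_index = {a: i for i, a in enumerate(areas)}
--
--     # ------------------------------------------------------------------------
--     # APPLY RECENCY-WEIGHTED FAIRNESS PENALTIES
--     # ------------------------------------------------------------------------
--     if history and "months" in history:
--         months_history = history["months"]
--
--         # Reverse: newest first
--         for months_back, month_entry in enumerate(reversed(months_history)):
--             # Beyond schedule → use last value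
--             weight = RECENCY_WEIGHTS[min(months_back, len(RECENCY_WEIGHTS) - 1)]
--
--             assignment = month_entry.get("assignment", {})
--             for person_name, area_name in assignment.items():
--
--                 # Clean BOM
--                 area_name = area_name.replace("\ufeff", "").replace("ï»¿", "")
--
--                 if person_name in person_index and area_name in area_index:
--                     p = person_index[person_name]
--                     a = area_index[area_name]
--
--                     # Add recency penalty
--                     cost[a][p] += weight
--
--     # ------------------------------------------------------------------------
--     # APPLY FORBIDDEN/SICKNESS PENALTIES
--     # ------------------------------------------------------------------------
--     for a in range(num_areas):
--         for p in range(num_people):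
--             if allowed_matrix[a][p] == 0:
--                 cost[a][p] = LARGE_PENALTY
--
--     return cost
-- ===== SOURCE B (Python) =====
-- LARGE_PENALTY = 10_000_000  # Forbidden or impossible
--
-- RECENCY_WEIGHTS = [
--     10_000,
--     8_000,
--     6_000,
--     4_000,
--     2_000,
--     1_000,
-- ]
--
-- def build_weighted_cost_matrix(allowed_matrix, people, areas, history):
--     """Cell-major re-computation: each cost[a][p] is computed independently as a
--     closed-form sum over the history (walked oldest-to-newest, recency = n-1-i),
--     with no shared mutable matrix, no accumulator dict and no override pass."""
--     num_areas = len(allowed_matrix)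
--     num_people = len(allowed_matrix[0])
--
--     person_index = {p: i for i, p in enumerate(people)}
--     area_index = {a: i for i, a in enumerate(areas)}
--
--     months = history["months"] if history and "months" in history else []
--     n = len(months)
--
--     def weight(r):
--         return RECENCY_WEIGHTS[min(r, len(RECENCY_WEIGHTS) - 1)]
--
--     def cell(a, p):
--         if allowed_matrix[a][p] == 0:
--             return LARGE_PENALTY
--         total = 0
--         for i, month in enumerate(months):
--             w = weight(n - 1 - i)
--             for name, raw_area in month.get("assignment", {}).items():
--                 clean = raw_area.replace("\ufeff", "").replace("ï»¿", "")
--                 if person_index.get(name) == p and area_index.get(clean) == a: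
--                     total += w
--         return total
--
--     return [[cell(a, p) for p in range(num_people)] for a in range(num_areas)]
-- ===== Notes on version B (the rewrite author's own statement) =====
-- stated objective: alternative
-- what changed: A allocates a zero matrix, mutates cells in place while scanning the reversed history, then overwrites forbidden cells in a second nested pass; B inverts the traversal: it computes each cost[a][p] independently as a closed-form sum over the history walked oldest-to-newest (recency = n-1-i), with no shared mutable matrix, no accumulator and no override pass, trading O(A*P+H) for O(A*P*H) work.
import Mathlib
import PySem

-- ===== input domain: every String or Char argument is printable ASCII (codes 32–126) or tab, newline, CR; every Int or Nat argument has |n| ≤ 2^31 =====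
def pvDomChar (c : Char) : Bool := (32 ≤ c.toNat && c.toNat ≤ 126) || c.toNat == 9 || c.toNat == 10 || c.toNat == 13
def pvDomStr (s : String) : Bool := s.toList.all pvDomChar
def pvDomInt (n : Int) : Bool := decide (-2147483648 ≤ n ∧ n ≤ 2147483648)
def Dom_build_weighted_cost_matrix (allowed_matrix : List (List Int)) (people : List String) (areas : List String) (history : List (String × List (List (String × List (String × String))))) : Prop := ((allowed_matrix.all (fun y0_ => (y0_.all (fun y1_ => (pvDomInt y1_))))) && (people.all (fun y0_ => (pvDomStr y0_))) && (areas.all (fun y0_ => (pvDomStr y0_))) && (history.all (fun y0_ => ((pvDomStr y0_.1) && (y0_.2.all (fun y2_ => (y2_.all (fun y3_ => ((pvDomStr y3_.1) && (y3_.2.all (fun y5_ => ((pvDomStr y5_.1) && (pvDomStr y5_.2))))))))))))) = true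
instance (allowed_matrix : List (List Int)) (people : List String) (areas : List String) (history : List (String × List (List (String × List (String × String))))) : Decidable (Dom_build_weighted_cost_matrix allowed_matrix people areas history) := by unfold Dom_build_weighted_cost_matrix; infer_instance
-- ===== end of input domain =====

-- B inverts A's traversal: instead of mutating a shared zero matrix while scanning the
-- reversed history and then overwriting forbidden cells in a second pass, B computes each
-- cost[a][p] independently as a sum over the history walked oldest-to-newest
-- (objective: alternative; same return value, no speed claim).

-- ===== PORT A =====
-- shared constants / helpers occurring verbatim in both Pythons
def pvWeights : List Int := [10000, 8000, 6000, 4000, 2000, 1000]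

-- RECENCY_WEIGHTS[min(r, len(RECENCY_WEIGHTS) - 1)]
def pvWt (r : Int) : Int :=
  PySem.List.pyGetD pvWeights (min r ((pvWeights.length : Int) - 1)) 0

-- area_name.replace("\ufeff", "").replace("ï»¿", "")
def pvClean (s : String) : String :=
  PySem.Str.replace (PySem.Str.replace s "\ufeff" "") "ï»¿" ""

-- {p: i for i, p in enumerate(l)}
def pvIndexOf (l : List String) : PySem.Dict String Int :=
  (PySem.List.enumerate l 0).foldl (fun d ip => d.insert ip.2 ip.1) PySem.Dict.empty

-- month_entry.get("assignment", {})
def pvAssign (month : List (String × List (String × String))) : List (String × String) :=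
  (PySem.Dict.mk month).getD "assignment" []

def build_weighted_cost_matrix (allowed_matrix : List (List Int)) (people : List String) (areas : List String) (history : List (String × List (List (String × List (String × String))))) : List (List Int) :=
  let num_areas : Int := allowed_matrix.length
  let num_people : Int := (PySem.List.pyGetD allowed_matrix 0 []).length
  let cost : List (List Int) :=
    (PySem.List.pyRange 0 num_areas 1).map
      (fun _ => (PySem.List.pyRange 0 num_people 1).map (fun _ => (0 : Int)))
  let person_index := pvIndexOf people
  let area_index := pvIndexOf areas
  let cost :=
    if history ≠ [] ∧ (PySem.Dict.mk history).contains "months" then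
      let months_history := (PySem.Dict.mk history).getD "months" []
      (PySem.List.enumerate months_history.reverse 0).foldl (fun cost me =>
        let weight := pvWt me.1
        (pvAssign me.2).foldl (fun cost pa =>
          let area_name := pvClean pa.2
          if person_index.contains pa.1 && area_index.contains area_name then
            let p := person_index.getD pa.1 0
            let a := area_index.getD area_name 0
            PySem.List.pySetD cost a
              (PySem.List.pySetD (PySem.List.pyGetD cost a []) p
                (PySem.List.pyGetD (PySem.List.pyGetD cost a []) p 0 + weight))
          else cost) cost) cost
    else cost
  (PySem.List.pyRange 0 num_areas 1).foldl (fun cost a =>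
    (PySem.List.pyRange 0 num_people 1).foldl (fun cost p =>
      if PySem.List.pyGetD (PySem.List.pyGetD allowed_matrix a []) p 0 = 0 then
        PySem.List.pySetD cost a
          (PySem.List.pySetD (PySem.List.pyGetD cost a []) p 10000000)
      else cost) cost) cost

-- ===== PORT B =====
def build_weighted_cost_matrix_alt (allowed_matrix : List (List Int)) (people : List String) (areas : List String) (history : List (String × List (List (String × List (String × String))))) : List (List Int) :=
  let num_areas : Int := allowed_matrix.length
  let num_people : Int := (PySem.List.pyGetD allowed_matrix 0 []).length
  let person_index := pvIndexOf people
  let area_index := pvIndexOf areas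
  let months : List (List (String × List (String × String))) :=
    if history ≠ [] ∧ (PySem.Dict.mk history).contains "months" then
      (PySem.Dict.mk history).getD "months" []
    else []
  let n : Int := months.length
  (PySem.List.pyRange 0 num_areas 1).map (fun a =>
    (PySem.List.pyRange 0 num_people 1).map (fun p =>
      if PySem.List.pyGetD (PySem.List.pyGetD allowed_matrix a []) p 0 = 0 then 10000000
      else
        (PySem.List.enumerate months 0).foldl (fun total im =>
          (pvAssign im.2).foldl (fun total pa =>
            if person_index.get? pa.1 == some p && area_index.get? (pvClean pa.2) == some a
            then total + pvWt (n - 1 - im.1) else total) total) 0))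

-- ===== PRECONDITION & SPEC =====
-- every (person, area) pair of the history that passes the membership guard,
-- with the (last-occurrence) index each name gets in the index dicts
def pvHitsOK (allowed_matrix : List (List Int)) (people : List String) (areas : List String) (history : List (String × List (List (String × List (String × String))))) : Prop :=
  ∀ month ∈ (PySem.Dict.mk history).getD "months" [], ∀ pa ∈ pvAssign month,
    pa.1 ∈ people → pvClean pa.2 ∈ areas →
      ((∀ k, k < people.length → people.getD k "" = pa.1 → k < (allowed_matrix.headD []).length) ∧
       (∀ k, k < areas.length → areas.getD k "" = pvClean pa.2 → k < allowed_matrix.length))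

-- Pre_ excludes exactly the inputs where A raises IndexError: an empty matrix
-- (allowed_matrix[0]), a row shorter than the first row (allowed_matrix[a][p] in the
-- override pass), or a history hit whose person/area index lies beyond the matrix
-- dimensions (cost[a][p] += weight).
def Pre_build_weighted_cost_matrix (allowed_matrix : List (List Int)) (people : List String) (areas : List String) (history : List (String × List (List (String × List (String × String))))) : Prop :=
  allowed_matrix ≠ [] ∧
  (∀ row ∈ allowed_matrix, (allowed_matrix.headD []).length ≤ row.length) ∧
  pvHitsOK allowed_matrix people areas history

instance (allowed_matrix : List (List Int)) (people : List String) (areas : List String) (history : List (String × List (List (String × List (String × String))))) : Decidable (Pre_build_weighted_cost_matrix allowed_matrix people areas history) := by unfold Pre_build_weighted_cost_matrix pvHitsOK; infer_instance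

def pvWitness_build_weighted_cost_matrix : List (List Int) × List String × List String × (List (String × List (List (String × List (String × String))))) :=
  ([[1]], ["p"], ["a"], [("months", [[("assignment", [("p", "a")])]])])

def Spec_build_weighted_cost_matrix (allowed_matrix : List (List Int)) (people : List String) (areas : List String) (history : List (String × List (List (String × List (String × String))))) (out : List (List Int)) : Prop := out = build_weighted_cost_matrix_alt allowed_matrix people areas history
instance (allowed_matrix : List (List Int)) (people : List String) (areas : List String) (history : List (String × List (List (String × List (String × String))))) (out : List (List Int)) : Decidable (Spec_build_weighted_cost_matrix allowed_matrix people areas history out) := by unfold Spec_build_weighted_cost_matrix; infer_instance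

-- ===== CLAIM (what is proved, stated in full; the proofs are below) =====
def Claim_equal_build_weighted_cost_matrix : Prop := ∀ (allowed_matrix : List (List Int)) (people : List String) (areas : List String) (history : List (String × List (List (String × List (String × String))))), Dom_build_weighted_cost_matrix allowed_matrix people areas history → Pre_build_weighted_cost_matrix allowed_matrix people areas history → Spec_build_weighted_cost_matrix allowed_matrix people areas history (build_weighted_cost_matrix allowed_matrix people areas history)

-- ===== LEMMAS AND PROOFS =====
-- matrix entry / shape invariants and the per-cell history sums used by the proofs
def pvEnt (c : List (List Int)) (a p : Nat) : Int := (c.getD a []).getD p 0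

def pvShape (na np : Nat) (c : List (List Int)) : Prop :=
  c.length = na ∧ ∀ r ∈ c, r.length = np

-- B's inner condition and per-month cell sum
def pvCond (pidx aidx : PySem.Dict String Int) (a p : Int) (pa : String × String) : Bool :=
  pidx.get? pa.1 == some p && aidx.get? (pvClean pa.2) == some a

def pvCellSum (pidx aidx : PySem.Dict String Int) (w : Int) (assn : List (String × String)) (a p : Int) : Int :=
  assn.foldl (fun s pa => if pvCond pidx aidx a p pa then s + w else s) 0

theorem pvFoldIte {α : Type} (c : α → Bool) (w : Int) (l : List α) (t : Int) :
    l.foldl (fun s x => if c x then s + w else s) t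
      = t + l.foldl (fun s x => if c x then s + w else s) 0 := by
  induction l generalizing t with
  | nil => simp
  | cons x xs ih =>
    simp only [List.foldl_cons]
    rw [ih, ih (if c x then 0 + w else 0)]
    by_cases h : c x <;> simp [h] <;> ring

theorem pvCellSum_cons (pidx aidx : PySem.Dict String Int) (w : Int) (pa : String × String)
    (rest : List (String × String)) (a p : Int) :
    pvCellSum pidx aidx w (pa :: rest) a p
      = (if pvCond pidx aidx a p pa then w else 0) + pvCellSum pidx aidx w rest a p := by
  simp only [pvCellSum, List.foldl_cons]
  rw [pvFoldIte]
  by_cases h : pvCond pidx aidx a p pa <;> simp [h]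

theorem pvIndexOf_fold_get? (l : List String) (s : Nat) (d : PySem.Dict String Int) (x : String) :
    (x ∉ l → ((PySem.List.enumerate l (s : Int)).foldl (fun d ip => d.insert ip.2 ip.1) d).get? x = d.get? x)
  ∧ (x ∈ l → ∃ k : Nat, k < l.length ∧ l.getD k "" = x ∧
      ((PySem.List.enumerate l (s : Int)).foldl (fun d ip => d.insert ip.2 ip.1) d).get? x = some ((s : Int) + k)) := by
  induction l generalizing s d with
  | nil => simp [PySem.List.enumerate_nil]
  | cons y ys ih =>
    have hcast : (s : Int) + 1 = ((s + 1 : Nat) : Int) := by push_cast; ring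
    rw [PySem.List.enumerate_cons]
    constructor
    · intro hx
      simp only [List.mem_cons, not_or] at hx
      have := (ih (s+1) (d.insert y (s : Int))).1 hx.2
      simp only [List.foldl_cons]
      rw [hcast] at *
      rw [this, PySem.Dict.get?_insert_of_ne _ _ hx.1]
    · intro hx
      by_cases hys : x ∈ ys
      · obtain ⟨k, hk, hget, heq⟩ := (ih (s+1) (d.insert y (s : Int))).2 hys
        refine ⟨k + 1, by simpa using Nat.succ_lt_succ hk, by simpa using hget, ?_⟩
        simp only [List.foldl_cons]
        rw [hcast, heq]
        congr 1
        push_cast; ring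
      · have hxy : x = y := by
          rcases List.mem_cons.mp hx with h | h
          · exact h
          · exact absurd h hys
        refine ⟨0, by simp, by simpa using hxy.symm, ?_⟩
        simp only [List.foldl_cons]
        rw [hcast] at *
        rw [(ih (s+1) (d.insert y (s : Int))).1 hys]
        subst hxy
        simp [PySem.Dict.get?_insert_self]

theorem pvIndexOf_contains (l : List String) (x : String) :
    (pvIndexOf l).contains x = true ↔ x ∈ l := by
  have h0 : ((0 : Nat) : Int) = (0 : Int) := by norm_num
  rw [pvIndexOf, PySem.Dict.contains_eq_isSome_get?]
  constructor
  · intro h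
    by_contra hx
    rw [← h0, (pvIndexOf_fold_get? l 0 PySem.Dict.empty x).1 hx] at h
    simp [PySem.Dict.get?_empty] at h
  · intro hx
    obtain ⟨k, _, _, heq⟩ := (pvIndexOf_fold_get? l 0 PySem.Dict.empty x).2 hx
    rw [← h0, heq]
    simp

theorem pvIndexOf_getD (l : List String) (x : String) (hx : x ∈ l) :
    ∃ k : Nat, k < l.length ∧ l.getD k "" = x ∧ (pvIndexOf l).getD x 0 = (k : Int) := by
  obtain ⟨k, hk, hget, heq⟩ := (pvIndexOf_fold_get? l 0 PySem.Dict.empty x).2 hx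
  refine ⟨k, hk, hget, ?_⟩
  rw [pvIndexOf, PySem.Dict.getD_eq_get?_getD]
  rw [show (0 : Int) = ((0 : Nat) : Int) by norm_num, heq]
  simp

theorem pvGetD_of_get? (d : PySem.Dict String Int) (x : String) (v : Int)
    (h : d.get? x = some v) : d.getD x 0 = v := by
  rw [PySem.Dict.getD_eq_get?_getD, h]; rfl

theorem pvGet?_eq_none_of_not_contains (d : PySem.Dict String Int) (x : String)
    (h : d.contains x = false) : d.get? x = none := by
  rw [PySem.Dict.contains_eq_isSome_get?] at h
  cases hq : d.get? x with
  | none => rfl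
  | some v => rw [hq] at h; simp at h

theorem pvCond_false_of_guard (pidx aidx : PySem.Dict String Int) (pa : String × String)
    (hg : (pidx.contains pa.1 && aidx.contains (pvClean pa.2)) = false) :
    ∀ a p : Int, pvCond pidx aidx a p pa = false := by
  intro a p
  rcases Bool.and_eq_false_iff.mp hg with h | h
  · rw [pvCond, pvGet?_eq_none_of_not_contains _ _ h]
    simp
  · rw [pvCond, pvGet?_eq_none_of_not_contains _ _ h]
    simp

theorem getD_set_self {α : Type} [Inhabited α] (l : List α) (i : Nat) (v d : α) (h : i < l.length) :
    (l.set i v).getD i d = v := by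
  rw [List.getD_eq_getElem _ d (by simpa using h)]
  exact List.getElem_set_self (by simpa using h)

theorem getD_set_ne {α : Type} [Inhabited α] (l : List α) (i j : Nat) (v d : α) (hne : i ≠ j) :
    (l.set i v).getD j d = l.getD j d := by
  by_cases hj : j < l.length
  · rw [List.getD_eq_getElem _ d (by simpa using hj), List.getD_eq_getElem _ d hj]
    exact List.getElem_set_ne hne (by simpa using hj)
  · rw [List.getD_eq_default _ d (by simpa using hj), List.getD_eq_default _ d (by omega)]

theorem pvEnt_upd (na np : Nat) (c : List (List Int)) (hs : pvShape na np c)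
    (a p : Nat) (ha : a < na) (hp : p < np) (v : Int) :
    pvShape na np (PySem.List.pySetD c ((a : Nat) : Int) (PySem.List.pySetD (PySem.List.pyGetD c ((a : Nat) : Int) []) ((p : Nat) : Int) v))
  ∧ ∀ a' p' : Nat, pvEnt (PySem.List.pySetD c ((a : Nat) : Int) (PySem.List.pySetD (PySem.List.pyGetD c ((a : Nat) : Int) []) ((p : Nat) : Int) v)) a' p'
      = if a' = a ∧ p' = p then v else pvEnt c a' p' := by
  obtain ⟨hlen, hrows⟩ := hs
  have hac : a < c.length := by omega
  simp only [PySem.List.pySetD_natCast, PySem.List.pyGetD_natCast]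
  have hrlen : (c.getD a []).length = np := by
    rw [List.getD_eq_getElem _ [] hac]; exact hrows _ (List.getElem_mem hac)
  constructor
  · refine ⟨by simp [hlen], ?_⟩
    intro r hr
    rcases List.mem_or_eq_of_mem_set hr with h | h
    · exact hrows r h
    · subst h; rw [List.length_set]; exact hrlen
  · intro a' p'
    by_cases haa : a' = a
    · subst haa
      rw [pvEnt, getD_set_self _ _ _ _ hac]
      by_cases hpp : p' = p
      · subst hpp
        simp only [and_self, if_true]
        exact getD_set_self _ _ _ _ (by omega)
      · simp only [hpp, and_false, if_false, pvEnt]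
        exact getD_set_ne _ _ _ _ _ (by omega)
    · simp only [haa, false_and, if_false, pvEnt]
      rw [getD_set_ne _ _ _ _ _ (by omega)]

-- A's inner month fold adds exactly the per-cell sum pvCellSum to every cell
theorem pvHist_inner (na np : Nat) (pidx aidx : PySem.Dict String Int)
    (assn : List (String × String)) (w : Int)
    (H : ∀ pa ∈ assn, pidx.contains pa.1 = true → aidx.contains (pvClean pa.2) = true →
      ∃ a p : Nat, aidx.getD (pvClean pa.2) 0 = (a : Int) ∧ pidx.getD pa.1 0 = (p : Int) ∧ a < na ∧ p < np) :
    ∀ (c : List (List Int)), pvShape na np c →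
      pvShape na np (assn.foldl (fun c pa =>
          if pidx.contains pa.1 && aidx.contains (pvClean pa.2) then
            PySem.List.pySetD c (aidx.getD (pvClean pa.2) 0)
              (PySem.List.pySetD (PySem.List.pyGetD c (aidx.getD (pvClean pa.2) 0) []) (pidx.getD pa.1 0)
                (PySem.List.pyGetD (PySem.List.pyGetD c (aidx.getD (pvClean pa.2) 0) []) (pidx.getD pa.1 0) 0 + w))
          else c) c)
      ∧ ∀ a p : Nat, a < na → p < np →
          pvEnt (assn.foldl (fun c pa =>
            if pidx.contains pa.1 && aidx.contains (pvClean pa.2) then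
              PySem.List.pySetD c (aidx.getD (pvClean pa.2) 0)
                (PySem.List.pySetD (PySem.List.pyGetD c (aidx.getD (pvClean pa.2) 0) []) (pidx.getD pa.1 0)
                  (PySem.List.pyGetD (PySem.List.pyGetD c (aidx.getD (pvClean pa.2) 0) []) (pidx.getD pa.1 0) 0 + w))
            else c) c) a p
          = pvEnt c a p + pvCellSum pidx aidx w assn ((a : Nat) : Int) ((p : Nat) : Int) := by
  induction assn with
  | nil =>
    intro c hs
    exact ⟨hs, fun a p _ _ => by simp [pvCellSum]⟩
  | cons pa rest ih =>
    intro c hs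
    simp only [List.foldl_cons]
    by_cases hg : (pidx.contains pa.1 && aidx.contains (pvClean pa.2)) = true
    · simp only [hg, if_true]
      obtain ⟨a0, p0, hae, hpe, ha0, hp0⟩ :=
        H pa (List.mem_cons_self ..) (Bool.and_eq_true_iff.mp hg).1 (Bool.and_eq_true_iff.mp hg).2
      have hpq : pidx.get? pa.1 = some ((p0 : Nat) : Int) := by
        have hgp := (Bool.and_eq_true_iff.mp hg).1
        rw [PySem.Dict.contains_eq_isSome_get?] at hgp
        cases hq : pidx.get? pa.1 with
        | none => rw [hq] at hgp; simp at hgp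
        | some v => rw [← hpe, pvGetD_of_get? _ _ _ hq]
      have haq : aidx.get? (pvClean pa.2) = some ((a0 : Nat) : Int) := by
        have hga := (Bool.and_eq_true_iff.mp hg).2
        rw [PySem.Dict.contains_eq_isSome_get?] at hga
        cases hq : aidx.get? (pvClean pa.2) with
        | none => rw [hq] at hga; simp at hga
        | some v => rw [← hae, pvGetD_of_get? _ _ _ hq]
      rw [hae, hpe]
      have hv : PySem.List.pyGetD (PySem.List.pyGetD c ((a0 : Nat) : Int) []) ((p0 : Nat) : Int) 0 = pvEnt c a0 p0 := by
        simp [PySem.List.pyGetD_natCast, pvEnt]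
      rw [hv]
      obtain ⟨hs', hent⟩ := pvEnt_upd na np c hs a0 p0 ha0 hp0 (pvEnt c a0 p0 + w)
      obtain ⟨hs'', hent''⟩ := ih (fun q hq => H q (List.mem_cons_of_mem _ hq)) _ hs'
      refine ⟨hs'', ?_⟩
      intro a p ha hp
      rw [hent'' a p ha hp, hent a p, pvCellSum_cons]
      have hcond : pvCond pidx aidx ((a : Nat) : Int) ((p : Nat) : Int) pa = true ↔ (a = a0 ∧ p = p0) := by
        simp only [pvCond, hpq, haq, Bool.and_eq_true, beq_iff_eq, Option.some.injEq]
        constructor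
        · rintro ⟨h1, h2⟩
          exact ⟨by exact_mod_cast h2.symm, by exact_mod_cast h1.symm⟩
        · rintro ⟨h1, h2⟩
          subst h1; subst h2; exact ⟨rfl, rfl⟩
      by_cases hc : a = a0 ∧ p = p0
      · rw [if_pos hc, if_pos (hcond.mpr hc)]
        obtain ⟨h1, h2⟩ := hc; subst h1; subst h2; ring
      · rw [if_neg hc, if_neg (fun h => hc (hcond.mp h))]
        ring
    · have hg' : (pidx.contains pa.1 && aidx.contains (pvClean pa.2)) = false := by
        cases h : (pidx.contains pa.1 && aidx.contains (pvClean pa.2))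
        · rfl
        · exact absurd h hg
      simp only [hg', Bool.false_eq_true, if_false]
      obtain ⟨hs'', hent''⟩ := ih (fun q hq => H q (List.mem_cons_of_mem _ hq)) _ hs
      refine ⟨hs'', ?_⟩
      intro a p ha hp
      rw [hent'' a p ha hp, pvCellSum_cons,
        if_neg (by rw [pvCond_false_of_guard pidx aidx pa hg']; simp)]
      ring

-- A's whole history fold adds the summed per-month cell sums
theorem pvHist_outer (na np : Nat) (pidx aidx : PySem.Dict String Int)
    (L : List (Int × List (String × List (String × String))))
    (H : ∀ q ∈ L, ∀ pa ∈ pvAssign q.2, pidx.contains pa.1 = true → aidx.contains (pvClean pa.2) = true →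
      ∃ a p : Nat, aidx.getD (pvClean pa.2) 0 = (a : Int) ∧ pidx.getD pa.1 0 = (p : Int) ∧ a < na ∧ p < np) :
    ∀ (c : List (List Int)), pvShape na np c →
      pvShape na np (L.foldl (fun c me =>
          (pvAssign me.2).foldl (fun c pa =>
            if pidx.contains pa.1 && aidx.contains (pvClean pa.2) then
              PySem.List.pySetD c (aidx.getD (pvClean pa.2) 0)
                (PySem.List.pySetD (PySem.List.pyGetD c (aidx.getD (pvClean pa.2) 0) []) (pidx.getD pa.1 0)
                  (PySem.List.pyGetD (PySem.List.pyGetD c (aidx.getD (pvClean pa.2) 0) []) (pidx.getD pa.1 0) 0 + pvWt me.1))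
            else c) c) c)
      ∧ ∀ a p : Nat, a < na → p < np →
          pvEnt (L.foldl (fun c me =>
            (pvAssign me.2).foldl (fun c pa =>
              if pidx.contains pa.1 && aidx.contains (pvClean pa.2) then
                PySem.List.pySetD c (aidx.getD (pvClean pa.2) 0)
                  (PySem.List.pySetD (PySem.List.pyGetD c (aidx.getD (pvClean pa.2) 0) []) (pidx.getD pa.1 0)
                    (PySem.List.pyGetD (PySem.List.pyGetD c (aidx.getD (pvClean pa.2) 0) []) (pidx.getD pa.1 0) 0 + pvWt me.1))
              else c) c) c) a p
          = pvEnt c a p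
            + (L.map (fun me => pvCellSum pidx aidx (pvWt me.1) (pvAssign me.2) ((a : Nat) : Int) ((p : Nat) : Int))).sum := by
  induction L with
  | nil =>
    intro c hs
    exact ⟨hs, fun a p _ _ => by simp⟩
  | cons me rest ih =>
    intro c hs
    simp only [List.foldl_cons]
    obtain ⟨hs', hent'⟩ := pvHist_inner na np pidx aidx (pvAssign me.2) (pvWt me.1)
      (H me (List.mem_cons_self ..)) c hs
    obtain ⟨hs'', hent''⟩ := ih (fun q hq => H q (List.mem_cons_of_mem _ hq)) _ hs'
    refine ⟨hs'', ?_⟩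
    intro a p ha hp
    rw [hent'' a p ha hp, hent' a p ha hp]
    simp only [List.map_cons, List.sum_cons]
    ring

-- B's nested fold is the per-cell history sum
theorem pvBSum (pidx aidx : PySem.Dict String Int) (n a p : Int)
    (L : List (Int × List (String × List (String × String)))) (t : Int) :
    L.foldl (fun total im =>
        (pvAssign im.2).foldl (fun total pa =>
          if pidx.get? pa.1 == some p && aidx.get? (pvClean pa.2) == some a
          then total + pvWt (n - 1 - im.1) else total) total) t
      = t + (L.map (fun im => pvCellSum pidx aidx (pvWt (n - 1 - im.1)) (pvAssign im.2) a p)).sum := by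
  induction L generalizing t with
  | nil => simp
  | cons im rest ih =>
    simp only [List.foldl_cons, List.map_cons, List.sum_cons]
    have hstep : (pvAssign im.2).foldl (fun total pa =>
        if pidx.get? pa.1 == some p && aidx.get? (pvClean pa.2) == some a
        then total + pvWt (n - 1 - im.1) else total) t
        = t + pvCellSum pidx aidx (pvWt (n - 1 - im.1)) (pvAssign im.2) a p :=
      pvFoldIte (fun pa => pidx.get? pa.1 == some p && aidx.get? (pvClean pa.2) == some a)
        (pvWt (n - 1 - im.1)) (pvAssign im.2) t
    rw [hstep, ih]
    ring

-- shifting the start of enumerate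
theorem pvEnumShift {M γ : Type} (xs : List M) (s : Int) (h : Int × M → γ) :
    (PySem.List.enumerate xs (s + 1)).map h
      = (PySem.List.enumerate xs s).map (fun ix => h (ix.1 + 1, ix.2)) := by
  induction xs generalizing s with
  | nil => simp [PySem.List.enumerate_nil]
  | cons y ys ih =>
    rw [PySem.List.enumerate_cons, PySem.List.enumerate_cons]
    simp only [List.map_cons]
    rw [ih (s + 1)]

-- summing over the enumerated reverse equals summing forward with mirrored index
theorem pvRevSum {M : Type} (F : Int → M → Int) (L : List M) (s : Int) :
    ((PySem.List.enumerate L.reverse s).map (fun rm => F rm.1 rm.2)).sum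
      = ((PySem.List.enumerate L s).map (fun im => F (2*s + (L.length : Int) - 1 - im.1) im.2)).sum := by
  induction L generalizing s with
  | nil => simp [PySem.List.enumerate_nil]
  | cons x xs ih =>
    have hlen : ((x :: xs).length : Int) = (xs.length : Int) + 1 := by push_cast [List.length_cons]; ring
    rw [List.reverse_cons, PySem.List.enumerate_append, PySem.List.enumerate_cons,
      PySem.List.enumerate_nil, List.map_append, List.sum_append, ih s,
      PySem.List.enumerate_cons]
    simp only [List.map_cons, List.map_nil, List.sum_cons, List.sum_nil, List.length_reverse]
    rw [pvEnumShift xs s (fun im => F (2*s + ((x :: xs).length : Int) - 1 - im.1) im.2)]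
    have hmap : (PySem.List.enumerate xs s).map
          (fun ix => F (2*s + ((x :: xs).length : Int) - 1 - (ix.1 + 1)) ix.2)
        = (PySem.List.enumerate xs s).map
          (fun ix => F (2*s + (xs.length : Int) - 1 - ix.1) ix.2) := by
      apply List.map_congr_left
      intro ix _
      congr 1
      rw [hlen]; ring
    rw [hmap, hlen]
    have harg : 2*s + ((xs.length : Int) + 1) - 1 - s = s + (xs.length : Int) := by ring
    rw [harg]
    ring

-- the freshly allocated zero matrix
theorem pvInit (na np : Nat) :
    pvShape na np ((PySem.List.pyRange 0 ((na : Nat) : Int) 1).map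
      (fun _ => (PySem.List.pyRange 0 ((np : Nat) : Int) 1).map (fun _ => (0 : Int))))
  ∧ ∀ a p : Nat, a < na → p < np →
      pvEnt ((PySem.List.pyRange 0 ((na : Nat) : Int) 1).map
        (fun _ => (PySem.List.pyRange 0 ((np : Nat) : Int) 1).map (fun _ => (0 : Int)))) a p = 0 := by
  have hrow : ((PySem.List.pyRange 0 ((np : Nat) : Int) 1).map (fun _ => (0 : Int))).length = np := by
    rw [List.length_map, PySem.List.length_pyRange_one]
    omega
  refine ⟨⟨?_, ?_⟩, ?_⟩
  · rw [List.length_map, PySem.List.length_pyRange_one]; omega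
  · intro r hr
    obtain ⟨x, _, rfl⟩ := List.mem_map.mp hr
    exact hrow
  · intro a p ha hp
    have h1 : ((PySem.List.pyRange 0 ((na : Nat) : Int) 1).map
        (fun _ => (PySem.List.pyRange 0 ((np : Nat) : Int) 1).map (fun _ => (0 : Int)))).getD a []
        = (PySem.List.pyRange 0 ((np : Nat) : Int) 1).map (fun _ => (0 : Int)) := by
      rw [List.getD_eq_getElem _ [] (by rw [List.length_map, PySem.List.length_pyRange_one]; omega)]
      simp
    rw [pvEnt, h1, List.getD_eq_getElem _ 0 (by rw [hrow]; omega)]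
    simp

theorem pvOv_inner (am : List (List Int)) (na np : Nat) (a : Nat) (ha : a < na) :
    ∀ (p0 : Nat) (c : List (List Int)), pvShape na np c →
      pvShape na np ((PySem.List.pyRange ((p0 : Nat) : Int) ((np : Nat) : Int) 1).foldl (fun c p =>
          if PySem.List.pyGetD (PySem.List.pyGetD am ((a : Nat) : Int) []) p 0 = 0 then
            PySem.List.pySetD c ((a : Nat) : Int)
              (PySem.List.pySetD (PySem.List.pyGetD c ((a : Nat) : Int) []) p 10000000)
          else c) c)
    ∧ ∀ a' p' : Nat, pvEnt ((PySem.List.pyRange ((p0 : Nat) : Int) ((np : Nat) : Int) 1).foldl (fun c p =>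
          if PySem.List.pyGetD (PySem.List.pyGetD am ((a : Nat) : Int) []) p 0 = 0 then
            PySem.List.pySetD c ((a : Nat) : Int)
              (PySem.List.pySetD (PySem.List.pyGetD c ((a : Nat) : Int) []) p 10000000)
          else c) c) a' p'
      = if a' = a ∧ p0 ≤ p' ∧ p' < np ∧ PySem.List.pyGetD (PySem.List.pyGetD am ((a : Nat) : Int) []) ((p' : Nat) : Int) 0 = 0
        then 10000000 else pvEnt c a' p' := by
  intro p0
  induction hd : np - p0 generalizing p0 with
  | zero =>
    intro c hs
    rw [PySem.List.pyRange_one_eq_nil (by exact_mod_cast Nat.le_of_sub_eq_zero hd)]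
    refine ⟨hs, ?_⟩
    intro a' p'
    rw [List.foldl_nil, if_neg (by omega)]
  | succ n ihn =>
    intro c hs
    rw [PySem.List.pyRange_one_cons (by exact_mod_cast (by omega : p0 < np))]
    simp only [List.foldl_cons]
    have hcast : ((p0 : Nat) : Int) + 1 = (((p0 + 1 : Nat)) : Int) := by push_cast; ring
    rw [hcast]
    by_cases hz : PySem.List.pyGetD (PySem.List.pyGetD am ((a : Nat) : Int) []) ((p0 : Nat) : Int) 0 = 0
    · rw [if_pos hz]
      obtain ⟨hs', hent⟩ := pvEnt_upd na np c hs a p0 ha (by omega) 10000000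
      obtain ⟨hs'', hent'⟩ := ihn (p0 + 1) (by omega) _ hs'
      refine ⟨hs'', ?_⟩
      intro a' p'
      rw [hent' a' p', hent a' p']
      by_cases h1 : a' = a ∧ p0 + 1 ≤ p' ∧ p' < np ∧ PySem.List.pyGetD (PySem.List.pyGetD am ((a : Nat) : Int) []) ((p' : Nat) : Int) 0 = 0
      · rw [if_pos h1, if_pos ⟨h1.1, by omega, h1.2.2⟩]
      · rw [if_neg h1]
        by_cases h2 : a' = a ∧ p' = p0
        · rw [if_pos h2, if_pos ⟨h2.1, by omega, by omega, by rw [h2.2]; exact hz⟩]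
        · rw [if_neg h2]
          by_cases h3 : a' = a ∧ p0 ≤ p' ∧ p' < np ∧ PySem.List.pyGetD (PySem.List.pyGetD am ((a : Nat) : Int) []) ((p' : Nat) : Int) 0 = 0
          · exfalso
            rcases h3 with ⟨e1, e2, e3, e4⟩
            rcases Nat.lt_or_ge p0 p' with hlt | hge
            · exact h1 ⟨e1, by omega, e3, e4⟩
            · exact h2 ⟨e1, by omega⟩
          · rw [if_neg h3]
    · rw [if_neg hz]
      obtain ⟨hs'', hent'⟩ := ihn (p0 + 1) (by omega) _ hs
      refine ⟨hs'', ?_⟩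
      intro a' p'
      rw [hent' a' p']
      by_cases h1 : a' = a ∧ p0 + 1 ≤ p' ∧ p' < np ∧ PySem.List.pyGetD (PySem.List.pyGetD am ((a : Nat) : Int) []) ((p' : Nat) : Int) 0 = 0
      · rw [if_pos h1, if_pos ⟨h1.1, by omega, h1.2.2⟩]
      · rw [if_neg h1]
        by_cases h3 : a' = a ∧ p0 ≤ p' ∧ p' < np ∧ PySem.List.pyGetD (PySem.List.pyGetD am ((a : Nat) : Int) []) ((p' : Nat) : Int) 0 = 0
        · rcases h3 with ⟨e1, e2, e3, e4⟩
          have hpp : p' = p0 := by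
            by_contra hne
            exact h1 ⟨e1, by omega, e3, e4⟩
          exfalso
          subst e1; subst hpp
          exact hz e4
        · rw [if_neg h3]

theorem pvOv_outer (am : List (List Int)) (na np : Nat) :
    ∀ (a0 : Nat) (c : List (List Int)), pvShape na np c →
      pvShape na np ((PySem.List.pyRange ((a0 : Nat) : Int) ((na : Nat) : Int) 1).foldl (fun c a =>
          (PySem.List.pyRange 0 ((np : Nat) : Int) 1).foldl (fun c p =>
            if PySem.List.pyGetD (PySem.List.pyGetD am a []) p 0 = 0 then
              PySem.List.pySetD c a
                (PySem.List.pySetD (PySem.List.pyGetD c a []) p 10000000)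
            else c) c) c)
    ∧ ∀ a' p' : Nat, pvEnt ((PySem.List.pyRange ((a0 : Nat) : Int) ((na : Nat) : Int) 1).foldl (fun c a =>
          (PySem.List.pyRange 0 ((np : Nat) : Int) 1).foldl (fun c p =>
            if PySem.List.pyGetD (PySem.List.pyGetD am a []) p 0 = 0 then
              PySem.List.pySetD c a
                (PySem.List.pySetD (PySem.List.pyGetD c a []) p 10000000)
            else c) c) c) a' p'
      = if a0 ≤ a' ∧ a' < na ∧ p' < np ∧ PySem.List.pyGetD (PySem.List.pyGetD am ((a' : Nat) : Int) []) ((p' : Nat) : Int) 0 = 0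
        then 10000000 else pvEnt c a' p' := by
  intro a0
  induction hd : na - a0 generalizing a0 with
  | zero =>
    intro c hs
    rw [PySem.List.pyRange_one_eq_nil (a := ((a0 : Nat) : Int)) (b := ((na : Nat) : Int)) (by exact_mod_cast Nat.le_of_sub_eq_zero hd)]
    refine ⟨hs, ?_⟩
    intro a' p'
    rw [List.foldl_nil, if_neg (by omega)]
  | succ n ihn =>
    intro c hs
    rw [PySem.List.pyRange_one_cons (a := ((a0 : Nat) : Int)) (b := ((na : Nat) : Int)) (by exact_mod_cast (by omega : a0 < na))]
    simp only [List.foldl_cons]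
    have hcast : ((a0 : Nat) : Int) + 1 = (((a0 + 1 : Nat)) : Int) := by push_cast; ring
    rw [hcast]
    obtain ⟨hs', hent⟩ := pvOv_inner am na np a0 (by omega) 0 c hs
    simp only [Nat.cast_zero] at hs' hent
    obtain ⟨hs'', hent'⟩ := ihn (a0 + 1) (by omega) _ hs'
    refine ⟨hs'', ?_⟩
    intro a' p'
    rw [hent' a' p', hent a' p']
    by_cases h1 : a0 + 1 ≤ a' ∧ a' < na ∧ p' < np ∧ PySem.List.pyGetD (PySem.List.pyGetD am ((a' : Nat) : Int) []) ((p' : Nat) : Int) 0 = 0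
    · rw [if_pos h1, if_pos ⟨by omega, h1.2⟩]
    · rw [if_neg h1]
      by_cases h2 : a' = a0 ∧ 0 ≤ p' ∧ p' < np ∧ PySem.List.pyGetD (PySem.List.pyGetD am ((a0 : Nat) : Int) []) ((p' : Nat) : Int) 0 = 0
      · rw [if_pos h2]
        have ha' : a' = a0 := h2.1
        rw [if_pos ⟨by omega, by omega, h2.2.2.1, by rw [ha']; exact h2.2.2.2⟩]
      · rw [if_neg h2]
        by_cases h3 : a0 ≤ a' ∧ a' < na ∧ p' < np ∧ PySem.List.pyGetD (PySem.List.pyGetD am ((a' : Nat) : Int) []) ((p' : Nat) : Int) 0 = 0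
        · exfalso
          rcases h3 with ⟨e1, e2, e3, e4⟩
          rcases Nat.lt_or_ge a0 a' with hlt | hge
          · exact h1 ⟨by omega, e2, e3, e4⟩
          · have : a' = a0 := by omega
            subst this
            exact h2 ⟨rfl, by omega, e3, e4⟩
        · rw [if_neg h3]

theorem pvEnt_eq_getElem (m : List (List Int)) (a p : Nat) (h1 : a < m.length) (g1 : p < (m[a]'h1).length) :
    (m[a]'h1)[p]'g1 = pvEnt m a p := by
  rw [pvEnt, List.getD_eq_getElem _ [] h1]
  exact (List.getD_eq_getElem _ 0 g1).symm

-- the override fold equals the pointwise matrix built from any G matching C in range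
theorem pvBuild_eq (am : List (List Int)) (na np : Nat) (G : Int → Int → Int)
    (C : List (List Int))
    (hr : ∀ a p : Nat, a < na → p < np → pvEnt C a p = G ((a : Nat) : Int) ((p : Nat) : Int))
    (hov : pvShape na np ((PySem.List.pyRange 0 ((na : Nat) : Int) 1).foldl (fun c a =>
          (PySem.List.pyRange 0 ((np : Nat) : Int) 1).foldl (fun c p =>
            if PySem.List.pyGetD (PySem.List.pyGetD am a []) p 0 = 0 then
              PySem.List.pySetD c a
                (PySem.List.pySetD (PySem.List.pyGetD c a []) p 10000000)
            else c) c) C)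
      ∧ ∀ a' p' : Nat, pvEnt ((PySem.List.pyRange 0 ((na : Nat) : Int) 1).foldl (fun c a =>
          (PySem.List.pyRange 0 ((np : Nat) : Int) 1).foldl (fun c p =>
            if PySem.List.pyGetD (PySem.List.pyGetD am a []) p 0 = 0 then
              PySem.List.pySetD c a
                (PySem.List.pySetD (PySem.List.pyGetD c a []) p 10000000)
            else c) c) C) a' p'
      = if 0 ≤ a' ∧ a' < na ∧ p' < np ∧ PySem.List.pyGetD (PySem.List.pyGetD am ((a' : Nat) : Int) []) ((p' : Nat) : Int) 0 = 0
        then 10000000 else pvEnt C a' p') :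
    ((PySem.List.pyRange 0 ((na : Nat) : Int) 1).foldl (fun c a =>
          (PySem.List.pyRange 0 ((np : Nat) : Int) 1).foldl (fun c p =>
            if PySem.List.pyGetD (PySem.List.pyGetD am a []) p 0 = 0 then
              PySem.List.pySetD c a
                (PySem.List.pySetD (PySem.List.pyGetD c a []) p 10000000)
            else c) c) C)
    = (PySem.List.pyRange 0 ((na : Nat) : Int) 1).map (fun a =>
        (PySem.List.pyRange 0 ((np : Nat) : Int) 1).map (fun p =>
          if PySem.List.pyGetD (PySem.List.pyGetD am a []) p 0 = 0 then 10000000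
          else G a p)) := by
  obtain ⟨⟨hlen, hrows⟩, hent⟩ := hov
  apply List.ext_getElem
  · rw [hlen, List.length_map, PySem.List.length_pyRange_one]; omega
  · intro a h1 h2
    have ha : a < na := by
      rw [List.length_map, PySem.List.length_pyRange_one] at h2; omega
    have hrhs : ((PySem.List.pyRange 0 ((na : Nat) : Int) 1).map (fun a =>
        (PySem.List.pyRange 0 ((np : Nat) : Int) 1).map (fun p =>
          if PySem.List.pyGetD (PySem.List.pyGetD am a []) p 0 = 0 then 10000000
          else G a p)))[a]'h2
        = (PySem.List.pyRange 0 ((np : Nat) : Int) 1).map (fun p =>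
          if PySem.List.pyGetD (PySem.List.pyGetD am ((a : Nat) : Int) []) p 0 = 0 then 10000000
          else G ((a : Nat) : Int) p) := by
      rw [List.getElem_map]
      rw [PySem.List.getElem_pyRange_one]
      simp
    rw [hrhs]
    have hrlen := hrows _ (List.getElem_mem h1)
    apply List.ext_getElem
    · rw [hrlen, List.length_map, PySem.List.length_pyRange_one]; omega
    · intro p g1 g2
      have hp : p < np := by
        rw [List.length_map, PySem.List.length_pyRange_one] at g2; omega
      have hrhs2 : ((PySem.List.pyRange 0 ((np : Nat) : Int) 1).map (fun p =>
          if PySem.List.pyGetD (PySem.List.pyGetD am ((a : Nat) : Int) []) p 0 = 0 then 10000000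
          else G ((a : Nat) : Int) p))[p]'g2
          = if PySem.List.pyGetD (PySem.List.pyGetD am ((a : Nat) : Int) []) ((p : Nat) : Int) 0 = 0 then 10000000
            else G ((a : Nat) : Int) ((p : Nat) : Int) := by
        rw [List.getElem_map, PySem.List.getElem_pyRange_one]
        simp
      rw [hrhs2]
      rw [pvEnt_eq_getElem _ a p h1 g1, hent a p]
      by_cases hz : PySem.List.pyGetD (PySem.List.pyGetD am ((a : Nat) : Int) []) ((p : Nat) : Int) 0 = 0
      · rw [if_pos ⟨by omega, ha, hp, hz⟩, if_pos hz]
      · rw [if_neg (by tauto), if_neg hz]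
        exact hr a p ha hp

theorem pvHeadD (l : List (List Int)) (d : List Int) : PySem.List.pyGetD l 0 d = l.headD d := by
  rw [PySem.List.pyGetD_zero]
  cases l <;> rfl

-- ===== VERDICT (by name: the statement is the Claim_ definition above) =====
theorem build_weighted_cost_matrix_spec : Claim_equal_build_weighted_cost_matrix := by
  intro am people areas history _hdom hpre
  obtain ⟨hne, hrows, hhits⟩ := hpre
  unfold Spec_build_weighted_cost_matrix
  simp only [build_weighted_cost_matrix, build_weighted_cost_matrix_alt]
  have hnp : (PySem.List.pyGetD am 0 []).length = (am.headD []).length := by rw [pvHeadD]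
  have H : ∀ q ∈ PySem.List.enumerate ((PySem.Dict.mk history).getD "months" []).reverse 0,
      ∀ pa ∈ pvAssign q.2,
      (pvIndexOf people).contains pa.1 = true → (pvIndexOf areas).contains (pvClean pa.2) = true →
      ∃ a p : Nat, (pvIndexOf areas).getD (pvClean pa.2) 0 = (a : Int) ∧
        (pvIndexOf people).getD pa.1 0 = (p : Int) ∧ a < am.length ∧ p < (PySem.List.pyGetD am 0 []).length := by
    intro q hq pa hpa hcp hca
    have hqm : q.2 ∈ ((PySem.Dict.mk history).getD "months" []) := by
      obtain ⟨k, hk, rfl⟩ := (PySem.List.mem_enumerate_iff _ _ _).mp hq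
      exact List.mem_reverse.mp (List.getElem_mem hk)
    have hmp : pa.1 ∈ people := (pvIndexOf_contains people pa.1).mp hcp
    have hma : pvClean pa.2 ∈ areas := (pvIndexOf_contains areas (pvClean pa.2)).mp hca
    obtain ⟨hb1, hb2⟩ := hhits q.2 hqm pa hpa hmp hma
    obtain ⟨p, hplt, hpget, hpeq⟩ := pvIndexOf_getD people pa.1 hmp
    obtain ⟨a, halt, haget, haeq⟩ := pvIndexOf_getD areas (pvClean pa.2) hma
    exact ⟨a, p, haeq, hpeq, hb2 a halt haget, by rw [hnp]; exact hb1 p hplt hpget⟩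
  by_cases hh : history ≠ [] ∧ (PySem.Dict.mk history).contains "months"
  · rw [if_pos hh, if_pos hh]
    obtain ⟨hsI, hentI⟩ := pvInit am.length (PySem.List.pyGetD am 0 []).length
    obtain ⟨hsC, hentC⟩ := pvHist_outer am.length (PySem.List.pyGetD am 0 []).length
      (pvIndexOf people) (pvIndexOf areas)
      (PySem.List.enumerate ((PySem.Dict.mk history).getD "months" []).reverse 0) H _ hsI
    have hov := pvOv_outer am am.length (PySem.List.pyGetD am 0 []).length 0 _ hsC
    simp only [Nat.cast_zero] at hov
    apply pvBuild_eq am am.length (PySem.List.pyGetD am 0 []).length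
      (fun a p =>
        (PySem.List.enumerate ((PySem.Dict.mk history).getD "months" []) 0).foldl (fun total im =>
          (pvAssign im.2).foldl (fun total pa =>
            if (pvIndexOf people).get? pa.1 == some p && (pvIndexOf areas).get? (pvClean pa.2) == some a
            then total + pvWt (((((PySem.Dict.mk history).getD "months" []).length : Int)) - 1 - im.1) else total) total) 0)
      _ ?_ hov
    intro a p ha hp
    beta_reduce
    rw [hentC a p ha hp, hentI a p ha hp]
    rw [pvBSum (pvIndexOf people) (pvIndexOf areas)
      ((((PySem.Dict.mk history).getD "months" []).length : Int)) ((a : Nat) : Int) ((p : Nat) : Int)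
      (PySem.List.enumerate ((PySem.Dict.mk history).getD "months" []) 0) 0]
    have hrev := pvRevSum (fun r m => pvCellSum (pvIndexOf people) (pvIndexOf areas) (pvWt r)
        (pvAssign m) ((a : Nat) : Int) ((p : Nat) : Int)) ((PySem.Dict.mk history).getD "months" []) 0
    beta_reduce at hrev
    rw [hrev]
    congr 1
    congr 1
    apply List.map_congr_left
    intro im _
    congr 2
    ring
  · rw [if_neg hh, if_neg hh]
    obtain ⟨hsI, hentI⟩ := pvInit am.length (PySem.List.pyGetD am 0 []).length
    have hov := pvOv_outer am am.length (PySem.List.pyGetD am 0 []).length 0 _ hsI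
    simp only [Nat.cast_zero] at hov
    apply pvBuild_eq am am.length (PySem.List.pyGetD am 0 []).length
      (fun a p =>
        (PySem.List.enumerate ([] : List (List (String × List (String × String)))) 0).foldl (fun total im =>
          (pvAssign im.2).foldl (fun total pa =>
            if (pvIndexOf people).get? pa.1 == some p && (pvIndexOf areas).get? (pvClean pa.2) == some a
            then total + pvWt ((([] : List (List (String × List (String × String)))).length : Int) - 1 - im.1) else total) total) 0)
      _ ?_ hov
    intro a p ha hp
    beta_reduce
    rw [hentI a p ha hp]
    simp [PySem.List.enumerate_nil]
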